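-- pv_equiv track=rewrite | github.com/Madfarm/matrix_manipulation_scripts | corpo-way/b.py | calculate_payout
-- ===== SOURCE A (Python) =====
-- def calculate_payout(temperatures):
--     total_payout = 0
--     for temperature in temperatures:
--         if temperature < 3500:
--             total_payout += 1000
--         elif temperature < 5000:
--             total_payout += 2000
--         else:
--             total_payout += 3000
--     return total_payout
-- ===== SOURCE B (Python) =====
-- def calculate_payout(temperatures):
--     # Counting formulation: everyone gets 1000, plus 1000 per threshold cleared.
--     n = len(temperatures)
--     hi1 = sum(1 for t in temperatures if t >= 3500)
--     hi2 = sum(1 for t in temperatures if t >= 5000)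
--     return 1000 * (n + hi1 + hi2)
-- ===== Notes on version B (the rewrite author's own statement) =====
-- stated objective: alternative
-- what changed: Replaces the per-element if/elif/else accumulation with a closed arithmetic formula 1000*(n + #{t>=3500} + #{t>=5000}) built from two counting passes.
import Mathlib
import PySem

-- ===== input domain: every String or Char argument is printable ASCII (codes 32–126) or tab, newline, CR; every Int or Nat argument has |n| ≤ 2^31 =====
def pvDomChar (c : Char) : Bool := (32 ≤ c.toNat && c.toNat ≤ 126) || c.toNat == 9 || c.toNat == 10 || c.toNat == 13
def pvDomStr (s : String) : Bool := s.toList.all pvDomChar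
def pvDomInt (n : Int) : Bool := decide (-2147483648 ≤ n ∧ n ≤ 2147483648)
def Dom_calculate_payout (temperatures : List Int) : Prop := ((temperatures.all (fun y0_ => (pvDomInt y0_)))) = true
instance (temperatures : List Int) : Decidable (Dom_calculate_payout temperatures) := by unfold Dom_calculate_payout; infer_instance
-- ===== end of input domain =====

-- B replaces A's if/elif/else accumulation with a closed counting formula (alternative decomposition, same O(n) cost).


-- ===== PORT A =====
-- Port of A: fold over the list accumulating the tiered payout.
def calculate_payout (temperatures : List Int) : Int :=
  temperatures.foldl (fun total_payout temperature =>
    if temperature < 3500 then total_payout + 1000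
    else if temperature < 5000 then total_payout + 2000
    else total_payout + 3000) 0

-- ===== PORT B =====
-- Port of B: closed arithmetic formula from two counting passes.
def calculate_payout_alt (temperatures : List Int) : Int :=
  1000 * ((temperatures.length : Int)
    + (temperatures.countP (fun t => decide (3500 ≤ t)) : Int)
    + (temperatures.countP (fun t => decide (5000 ≤ t)) : Int))

-- ===== PRECONDITION & SPEC =====
def Spec_calculate_payout (temperatures : List Int) (out : Int) : Prop := out = calculate_payout_alt temperatures
instance (temperatures : List Int) (out : Int) : Decidable (Spec_calculate_payout temperatures out) := by unfold Spec_calculate_payout; infer_instance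

-- ===== CLAIM (what is proved, stated in full; the proofs are below) =====
def Claim_equal_calculate_payout : Prop := ∀ (temperatures : List Int), Dom_calculate_payout temperatures → Spec_calculate_payout temperatures (calculate_payout temperatures)

-- ===== LEMMAS AND PROOFS =====

-- ===== VERDICT (by name: the statement is the Claim_ definition above) =====
lemma payout_foldl (temperatures : List Int) : ∀ acc : Int,
    temperatures.foldl (fun total_payout temperature =>
      if temperature < 3500 then total_payout + 1000
      else if temperature < 5000 then total_payout + 2000
      else total_payout + 3000) acc = acc + calculate_payout_alt temperatures := by
  induction temperatures with
  | nil => intro acc; simp [calculate_payout_alt]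
  | cons t ts ih =>
    intro acc
    simp only [List.foldl_cons, ih, calculate_payout_alt, List.countP_cons, List.length_cons]
    split_ifs <;> simp_all <;> push_cast <;> omega

theorem calculate_payout_spec : Claim_equal_calculate_payout := by
  intro ts _
  unfold Spec_calculate_payout calculate_payout
  rw [payout_foldl]
  ring
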